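-- pv_equiv track=rewrite | github.com/yeri3177/Algorithm | 프로그래머스/1/131128. 숫자 짝꿍/숫자 짝꿍.py | solution
-- ===== SOURCE A (Python) =====
-- def solution(X, Y):
--     answer = ''
--     x = [0,0,0,0,0,0,0,0,0,0]
--     y = [0,0,0,0,0,0,0,0,0,0]
--
--     for i in X:
--         x[int(i)] += 1
--
--     for i in Y:
--         y[int(i)] += 1
--
--     for i in range(9, -1, -1):
--         answer += str(i) * min(x[i], y[i])
--
--     if answer == '':
--         return '-1'
--     elif answer[0] == '0':
--         return '0'
--
--     return answer
-- ===== SOURCE B (Python) =====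
-- def solution(X, Y):
--     xs = sorted((int(c) for c in X), reverse=True)
--     ys = sorted((int(c) for c in Y), reverse=True)
--     res = []
--     i = j = 0
--     while i < len(xs) and j < len(ys):
--         a, b = xs[i], ys[j]
--         if a == b:
--             res.append(a)
--             i += 1
--             j += 1
--         elif a > b:
--             i += 1
--         else:
--             j += 1
--     if not res:
--         return '-1'
--     if res[0] == 0:
--         return '0'
--     return ''.join(map(str, res))
-- ===== Notes on version B (the rewrite author's own statement) =====
-- stated objective: alternative
-- what changed: Replaces the two fixed-size count arrays and the range(9,-1,-1) emission loop by sorting both strings' digits descending and running a two-pointer merge that emits each shared digit directly in order.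
import Mathlib
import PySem

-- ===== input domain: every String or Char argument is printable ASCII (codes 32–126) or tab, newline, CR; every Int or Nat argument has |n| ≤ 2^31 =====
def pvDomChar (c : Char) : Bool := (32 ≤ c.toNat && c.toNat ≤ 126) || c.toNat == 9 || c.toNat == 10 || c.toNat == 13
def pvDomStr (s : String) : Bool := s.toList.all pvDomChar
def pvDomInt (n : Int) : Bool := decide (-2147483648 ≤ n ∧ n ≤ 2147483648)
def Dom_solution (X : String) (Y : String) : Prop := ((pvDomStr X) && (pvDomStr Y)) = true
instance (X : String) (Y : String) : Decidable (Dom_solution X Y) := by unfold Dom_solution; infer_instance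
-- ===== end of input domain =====

-- B replaces A's two count arrays and the range(9,-1,-1) emission loop by a descending sort of
-- both strings followed by a two-pointer merge (objective: alternative, not faster).

-- ===== PORT A =====
-- x[int(i)] += 1 : int(i) is PySem.Int.ofStr? on the one-char string; on a non-digit char Python
-- raises ValueError (excluded by Pre_), where the .getD 0 default is never reached.
def pvBump (l : List Int) (c : Char) : List Int :=
  let i := (PySem.Int.ofStr? (String.mk [c])).getD 0
  PySem.List.pySetD l i (PySem.List.pyGetD l i 0 + 1)

-- answer is kept as List Char (string facts are proved on the list side);
-- str(i) * min(x[i], y[i]) is the flatten of min(...) copies of str(i)'s characters.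
def solution (X : String) (Y : String) : String :=
  let x := X.toList.foldl pvBump [0,0,0,0,0,0,0,0,0,0]
  let y := Y.toList.foldl pvBump [0,0,0,0,0,0,0,0,0,0]
  let answer := (PySem.List.pyRange 9 (-1) (-1)).foldl
    (fun ans i =>
      ans ++ (List.replicate (min (PySem.List.pyGetD x i 0) (PySem.List.pyGetD y i 0)).toNat
               (PySem.Int.toChars i)).flatten) []
  if answer = [] then "-1"
  else if PySem.List.pyGet? answer 0 = some '0' then "0"
  else String.mk answer

-- ===== PORT B =====
-- the two-pointer while loop of Source B as the obvious recursion on the two suffixes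
def pvMerge : List Char → List Char → List Char
  | [], _ => []
  | _ :: _, [] => []
  | a :: as, b :: bs =>
    if a = b then a :: pvMerge as bs
    else if b < a then pvMerge as (b :: bs)
    else pvMerge (a :: as) bs
termination_by xs ys => xs.length + ys.length

def solution_alt (X : String) (Y : String) : String :=
  let xs := PySem.List.sorted X.toList (fun c => c) true
  let ys := PySem.List.sorted Y.toList (fun c => c) true
  let res := pvMerge xs ys
  if res = [] then "-1"
  else if PySem.List.pyGet? res 0 = some '0' then "0"
  else String.mk res

-- ===== PRECONDITION & SPEC =====
-- Pre_ excludes exactly the inputs on which A raises ValueError: a character outside '0'..'9'.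
def Pre_solution (X : String) (Y : String) : Prop :=
  (X.toList.all Char.isDigit && Y.toList.all Char.isDigit) = true
instance (X : String) (Y : String) : Decidable (Pre_solution X Y) := by
  unfold Pre_solution; infer_instance

def pvWitness_solution : String × String := ("", "")

def Spec_solution (X : String) (Y : String) (out : String) : Prop := out = solution_alt X Y
instance (X : String) (Y : String) (out : String) : Decidable (Spec_solution X Y out) := by
  unfold Spec_solution; infer_instance

-- ===== CLAIM (what is proved, stated in full; the proofs are below) =====
def Claim_equal_solution : Prop :=
  ∀ (X : String) (Y : String), Dom_solution X Y → Pre_solution X Y →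
    Spec_solution X Y (solution X Y)

-- ===== LEMMAS AND PROOFS =====

def pvChr (d : Nat) : Char := Char.ofNat (48 + d)
def pvCnt (s : List Char) (d : Nat) : Nat := s.count (pvChr d)
def pvDs : List Nat := [9,8,7,6,5,4,3,2,1,0]
def pvSeg (X Y : String) (d : Nat) : List Char :=
  List.replicate (min (pvCnt X.toList d) (pvCnt Y.toList d)) (pvChr d)

lemma pv_digit_cases (c : Char) (h : '0' ≤ c ∧ c ≤ '9') :
    c = '0' ∨ c = '1' ∨ c = '2' ∨ c = '3' ∨ c = '4' ∨ c = '5' ∨ c = '6' ∨ c = '7' ∨ c = '8' ∨ c = '9' := by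
  obtain ⟨h1, h2⟩ := h
  rw [Char.le_def] at h1 h2
  have v1 : ('0' : Char).toNat ≤ c.toNat := UInt32.le_iff_toNat_le.mp h1
  have v2 : c.toNat ≤ ('9' : Char).toNat := UInt32.le_iff_toNat_le.mp h2
  rw [show ('0' : Char).toNat = 48 from rfl] at v1
  rw [show ('9' : Char).toNat = 57 from rfl] at v2
  have hv : c.toNat = 48 ∨ c.toNat = 49 ∨ c.toNat = 50 ∨ c.toNat = 51 ∨ c.toNat = 52 ∨
      c.toNat = 53 ∨ c.toNat = 54 ∨ c.toNat = 55 ∨ c.toNat = 56 ∨ c.toNat = 57 := by omega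
  have hc := Char.ofNat_toNat c
  rcases hv with e|e|e|e|e|e|e|e|e|e <;> rw [e] at hc <;> rw [← hc] <;> decide

lemma pvChr_lt (d' d : Nat) (h1 : d' < d) (h2 : d < 10) : pvChr d' < pvChr d := by
  interval_cases d <;> interval_cases d' <;> decide

lemma pvToChars (d : Nat) (hd : d < 10) : PySem.Int.toChars (d : Int) = [pvChr d] := by
  interval_cases d <;> decide

lemma pvBump_digit (l : List Int) (c : Char) (h : '0' ≤ c ∧ c ≤ '9') :
    pvBump l c = PySem.List.pySetD l ((c.toNat - 48 : Nat) : Int)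
      (PySem.List.pyGetD l ((c.toNat - 48 : Nat) : Int) 0 + 1) := by
  rcases pv_digit_cases c h with rfl|rfl|rfl|rfl|rfl|rfl|rfl|rfl|rfl|rfl <;>
    simp only [pvBump] <;>
    norm_num [show (PySem.Int.ofStr? (String.mk ['0'])).getD 0 = 0 from by decide,
      show (PySem.Int.ofStr? (String.mk ['1'])).getD 0 = 1 from by decide,
      show (PySem.Int.ofStr? (String.mk ['2'])).getD 0 = 2 from by decide,
      show (PySem.Int.ofStr? (String.mk ['3'])).getD 0 = 3 from by decide,
      show (PySem.Int.ofStr? (String.mk ['4'])).getD 0 = 4 from by decide,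
      show (PySem.Int.ofStr? (String.mk ['5'])).getD 0 = 5 from by decide,
      show (PySem.Int.ofStr? (String.mk ['6'])).getD 0 = 6 from by decide,
      show (PySem.Int.ofStr? (String.mk ['7'])).getD 0 = 7 from by decide,
      show (PySem.Int.ofStr? (String.mk ['8'])).getD 0 = 8 from by decide,
      show (PySem.Int.ofStr? (String.mk ['9'])).getD 0 = 9 from by decide,
      show ('0':Char).toNat = 48 from rfl, show ('1':Char).toNat = 49 from rfl,
      show ('2':Char).toNat = 50 from rfl, show ('3':Char).toNat = 51 from rfl,
      show ('4':Char).toNat = 52 from rfl, show ('5':Char).toNat = 53 from rfl,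
      show ('6':Char).toNat = 54 from rfl, show ('7':Char).toNat = 55 from rfl,
      show ('8':Char).toNat = 56 from rfl, show ('9':Char).toNat = 57 from rfl,
      PySem.List.pySetD, PySem.List.pyGetD]

lemma pv_eq_chr_iff (c : Char) (hc : '0' ≤ c ∧ c ≤ '9') (d : Nat) (hd : d < 10) :
    c = pvChr d ↔ c.toNat - 48 = d := by
  rcases pv_digit_cases c hc with rfl|rfl|rfl|rfl|rfl|rfl|rfl|rfl|rfl|rfl <;>
    (interval_cases d <;> simp [pvChr])

-- A's count loop computes the digit counts
lemma pvFoldBump (cs : List Char) (h : ∀ c ∈ cs, '0' ≤ c ∧ c ≤ '9')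
    (l : List Int) (hl : l.length = 10) (d : Nat) (hd : d < 10) :
    PySem.List.pyGetD (cs.foldl pvBump l) (d : Int) 0
      = PySem.List.pyGetD l (d : Int) 0 + (cs.count (pvChr d) : Int) := by
  induction cs generalizing l with
  | nil => simp
  | cons c cs ih =>
    have hc := h c (List.mem_cons_self)
    have hcs : ∀ x ∈ cs, '0' ≤ x ∧ x ≤ '9' := fun x hx => h x (List.mem_cons_of_mem _ hx)
    have hlen : (pvBump l c).length = 10 := by
      simp [pvBump, PySem.List.length_pySetD, hl]
    have hidx : c.toNat - 48 < 10 := by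
      rcases pv_digit_cases c hc with rfl|rfl|rfl|rfl|rfl|rfl|rfl|rfl|rfl|rfl <;> decide
    rw [List.foldl_cons, ih hcs _ hlen]
    rw [pvBump_digit l c hc]
    rw [PySem.List.pyGetD_pySetD_natCast l (c.toNat - 48) d _ _ (by omega)]
    rw [List.count_cons]
    by_cases hcd : c = pvChr d
    · have e : d = c.toNat - 48 := ((pv_eq_chr_iff c hc d hd).mp hcd).symm
      rw [if_pos e, ← e]
      simp [hcd]
      ring
    · have hne : ¬ d = c.toNat - 48 := fun e => hcd ((pv_eq_chr_iff c hc d hd).mpr e.symm)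
      simp [hne, hcd]

-- A's emission loop produces the canonical shared-digit list
lemma pvA_core (X Y : String)
    (hX : ∀ c ∈ X.toList, '0' ≤ c ∧ c ≤ '9') (hY : ∀ c ∈ Y.toList, '0' ≤ c ∧ c ≤ '9') :
    (PySem.List.pyRange 9 (-1) (-1)).foldl
      (fun ans i =>
        ans ++ (List.replicate (min
            (PySem.List.pyGetD (X.toList.foldl pvBump [0,0,0,0,0,0,0,0,0,0]) i 0)
            (PySem.List.pyGetD (Y.toList.foldl pvBump [0,0,0,0,0,0,0,0,0,0]) i 0)).toNat
          (PySem.Int.toChars i)).flatten) []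
      = pvDs.flatMap (pvSeg X Y) := by
  rw [PySem.List.foldl_append_eq_flatMap]
  rw [show PySem.List.pyRange 9 (-1) (-1) = List.map (Nat.cast : Nat → Int) pvDs from by decide]
  rw [List.flatMap_map, List.nil_append]
  apply List.flatMap_congr
  intro d hd
  have hd10 : d < 10 := by
    simp [pvDs] at hd
    omega
  rw [pvFoldBump X.toList hX _ (by decide) d hd10,
      pvFoldBump Y.toList hY _ (by decide) d hd10]
  have h0 : PySem.List.pyGetD ([0,0,0,0,0,0,0,0,0,0] : List Int) (d : Int) 0 = 0 := by
    rw [PySem.List.pyGetD_natCast]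
    interval_cases d <;> rfl
  rw [h0, pvToChars d hd10]
  have hmin : (min ((0:Int) + (List.count (pvChr d) X.toList : Int))
        (0 + (List.count (pvChr d) Y.toList : Int))).toNat
      = min (List.count (pvChr d) X.toList) (List.count (pvChr d) Y.toList) := by omega
  rw [hmin, List.flatten_replicate_singleton]
  rfl

-- the canonical digit-run list has the same counts as s
lemma pvCount_canon (s : List Char) (h : ∀ c ∈ s, '0' ≤ c ∧ c ≤ '9') (a : Char) :
    (pvDs.flatMap fun d => List.replicate (pvCnt s d) (pvChr d)).count a = s.count a := by
  by_cases hda : '0' ≤ a ∧ a ≤ '9'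
  · rcases pv_digit_cases a hda with rfl|rfl|rfl|rfl|rfl|rfl|rfl|rfl|rfl|rfl <;>
      simp [pvDs, pvCnt, pvChr, List.count_append, List.count_replicate]
  · have h0 : s.count a = 0 := List.count_eq_zero.mpr (fun ha => hda (h a ha))
    have hne : ∀ d : Nat, d < 10 → pvChr d ≠ a := by
      intro d hd e
      exact hda (by subst e; interval_cases d <;> exact ⟨by decide, by decide⟩)
    rw [h0]
    simp [pvDs, pvCnt, List.count_append, List.count_replicate,
      hne 0 (by omega), hne 1 (by omega), hne 2 (by omega), hne 3 (by omega), hne 4 (by omega),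
      hne 5 (by omega), hne 6 (by omega), hne 7 (by omega), hne 8 (by omega), hne 9 (by omega)]

lemma pvCanon_pairwise (s : List Char) :
    (pvDs.flatMap fun d => List.replicate (pvCnt s d) (pvChr d)).Pairwise (fun a b => b ≤ a) := by
  have key : ∀ ds : List Nat, ds.Pairwise (· > ·) → (∀ d ∈ ds, d < 10) →
      (ds.flatMap fun d => List.replicate (pvCnt s d) (pvChr d)).Pairwise
        (fun a b : Char => b ≤ a) := by
    intro ds hds hb
    induction ds with
    | nil => simp
    | cons d ds ih =>
      rw [List.flatMap_cons, List.pairwise_append]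
      refine ⟨List.pairwise_replicate.mpr (Or.inr le_rfl),
        ih hds.of_cons (fun x hx => hb x (List.mem_cons_of_mem _ hx)), ?_⟩
      intro x hx y hy
      obtain rfl := List.eq_of_mem_replicate hx
      obtain ⟨d', hd', hy'⟩ := List.mem_flatMap.mp hy
      obtain rfl := List.eq_of_mem_replicate hy'
      exact le_of_lt (pvChr_lt d' d (List.rel_of_pairwise_cons hds hd') (hb d List.mem_cons_self))
  exact key pvDs (by decide) (by decide)

-- descending sort of a digit string is the canonical digit-run list
lemma pvSortedDesc (s : List Char) (h : ∀ c ∈ s, '0' ≤ c ∧ c ≤ '9') :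
    PySem.List.sorted s (fun c => c) true
      = pvDs.flatMap (fun d => List.replicate (pvCnt s d) (pvChr d)) := by
  apply List.eq_of_perm_of_sorted (le := fun a b : Char => b ≤ a)
  · intro a b _ _ h1 h2; exact le_antisymm h2 h1
  · exact PySem.List.sorted_pairwise_rev s (fun c => c)
  · exact pvCanon_pairwise s
  · exact ((PySem.List.sorted_perm s (fun c => c) true)).trans
      (List.perm_iff_count.mpr (fun a => (pvCount_canon s h a).symm))

lemma pvMerge_nil_right (xs : List Char) : pvMerge xs [] = [] := by
  cases xs <;> simp [pvMerge]

lemma pvMerge_drop_left (a : Char) (k : Nat) (xs ys : List Char) (h : ∀ b ∈ ys, b < a) :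
    pvMerge (List.replicate k a ++ xs) ys = pvMerge xs ys := by
  induction k with
  | zero => simp
  | succ k ih =>
    cases ys with
    | nil => rw [pvMerge_nil_right, pvMerge_nil_right]
    | cons b bs =>
      have hb := h b List.mem_cons_self
      rw [List.replicate_succ, List.cons_append]
      rw [show pvMerge (a :: (List.replicate k a ++ xs)) (b :: bs)
            = pvMerge (List.replicate k a ++ xs) (b :: bs) from by
        simp [pvMerge, hb, ne_of_gt hb]]
      exact ih

lemma pvMerge_drop_right (a : Char) (k : Nat) (xs ys : List Char) (h : ∀ b ∈ xs, b < a) :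
    pvMerge xs (List.replicate k a ++ ys) = pvMerge xs ys := by
  induction k with
  | zero => simp
  | succ k ih =>
    cases xs with
    | nil => simp [pvMerge]
    | cons c cs =>
      have hc := h c List.mem_cons_self
      rw [List.replicate_succ, List.cons_append]
      rw [show pvMerge (c :: cs) (a :: (List.replicate k a ++ ys))
            = pvMerge (c :: cs) (List.replicate k a ++ ys) from by
        simp [pvMerge, ne_of_lt hc, not_lt_of_gt hc]]
      exact ih

lemma pvMerge_pair (a : Char) (m n : Nat) (xs ys : List Char)
    (hx : ∀ b ∈ xs, b < a) (hy : ∀ b ∈ ys, b < a) :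
    pvMerge (List.replicate m a ++ xs) (List.replicate n a ++ ys)
      = List.replicate (min m n) a ++ pvMerge xs ys := by
  induction m generalizing n with
  | zero => simp [pvMerge_drop_right a n xs ys hx]
  | succ m ih =>
    cases n with
    | zero => simp [pvMerge_drop_left a (m+1) xs ys hy]
    | succ n =>
      rw [List.replicate_succ, List.replicate_succ, List.cons_append, List.cons_append]
      rw [show pvMerge (a :: (List.replicate m a ++ xs)) (a :: (List.replicate n a ++ ys))
            = a :: pvMerge (List.replicate m a ++ xs) (List.replicate n a ++ ys) from by
        simp [pvMerge]]
      rw [ih n]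
      rw [show min (m+1) (n+1) = min m n + 1 from by omega]
      rw [List.replicate_succ, List.cons_append]

-- merging two canonical digit-run lists keeps min runs, in order
lemma pvMerge_canon (ds : List Nat) (hds : List.Pairwise (· > ·) ds) (hb : ∀ d ∈ ds, d < 10)
    (f g : Nat → Nat) :
    pvMerge (ds.flatMap fun d => List.replicate (f d) (pvChr d))
            (ds.flatMap fun d => List.replicate (g d) (pvChr d))
      = ds.flatMap fun d => List.replicate (min (f d) (g d)) (pvChr d) := by
  induction ds with
  | nil => simp [pvMerge]
  | cons d ds ih =>
    have hcross : ∀ (h : Nat → Nat) (c : Char),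
        c ∈ ds.flatMap (fun d' => List.replicate (h d') (pvChr d')) → c < pvChr d := by
      intro h c hc
      obtain ⟨d', hd', hc'⟩ := List.mem_flatMap.mp hc
      obtain rfl := List.eq_of_mem_replicate hc'
      exact pvChr_lt d' d (List.rel_of_pairwise_cons hds hd') (hb d List.mem_cons_self)
    rw [List.flatMap_cons, List.flatMap_cons, List.flatMap_cons]
    rw [pvMerge_pair (pvChr d) (f d) (g d) _ _ (hcross f) (hcross g)]
    rw [ih hds.of_cons (fun x hx => hb x (List.mem_cons_of_mem _ hx))]

lemma pvB_core (X Y : String)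
    (hX : ∀ c ∈ X.toList, '0' ≤ c ∧ c ≤ '9') (hY : ∀ c ∈ Y.toList, '0' ≤ c ∧ c ≤ '9') :
    pvMerge (PySem.List.sorted X.toList (fun c => c) true)
            (PySem.List.sorted Y.toList (fun c => c) true)
      = pvDs.flatMap (pvSeg X Y) := by
  rw [pvSortedDesc X.toList hX, pvSortedDesc Y.toList hY,
    pvMerge_canon pvDs (by decide) (by decide)]
  rfl

-- ===== VERDICT (by name: the statement is the Claim_ definition above) =====
theorem solution_spec : Claim_equal_solution := by
  intro X Y _ hpre
  have hchar : ∀ c : Char, c.isDigit = true → '0' ≤ c ∧ c ≤ '9' := by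
    intro c hc
    simp [Char.isDigit] at hc
    exact ⟨by rw [Char.le_def]; exact hc.1, by rw [Char.le_def]; exact hc.2⟩
  have hpre' : (∀ c ∈ X.toList, '0' ≤ c ∧ c ≤ '9') ∧ (∀ c ∈ Y.toList, '0' ≤ c ∧ c ≤ '9') := by
    simp only [Pre_solution, Bool.and_eq_true, List.all_eq_true] at hpre
    exact ⟨fun c hcm => hchar c (hpre.1 c hcm), fun c hcm => hchar c (hpre.2 c hcm)⟩
  obtain ⟨hX, hY⟩ := hpre'
  unfold Spec_solution
  show solution X Y = solution_alt X Y
  simp only [solution, solution_alt]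
  rw [pvA_core X Y hX hY, pvB_core X Y hX hY]
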